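-- pv_equiv track=rewrite | github.com/pushpa-info-14/python-programming | LeetCode/750-1000/Q859 Buddy Strings.py | buddyStrings2
-- ===== SOURCE A (Python) =====
-- def buddyStrings2(s: str, goal: str) -> bool:
--     if len(s) != len(goal):
--         return False
--
--     if s == goal:
--         return len(set(s)) != len(s)
--
--     diff = []
--     for i in range(len(s)):
--         if s[i] != goal[i]:
--             diff.append(i)
--     if len(diff) != 2:
--         return False
--
--     i = diff[0]
--     j = diff[1]
--     return s[i] == goal[j] and s[j] == goal[i]
-- ===== SOURCE B (Python) =====
-- def buddyStrings2(s: str, goal: str) -> bool: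
--     if len(s) != len(goal):
--         return False
--     d = sum(a != b for a, b in zip(s, goal))
--     if d == 0:
--         return len(set(s)) < len(s)
--     return d == 2 and sorted(s) == sorted(goal)
-- ===== Notes on version B (the rewrite author's own statement) =====
-- stated objective: idiomatic
-- what changed: Replaces the index-collecting loop plus cross-indexed swap check with a single zip pass counting mismatches and, for the two-mismatch case, a sorted-character (multiset/anagram) comparison; the duplicate test uses len(set(s)) < len(s).
import Mathlib
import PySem

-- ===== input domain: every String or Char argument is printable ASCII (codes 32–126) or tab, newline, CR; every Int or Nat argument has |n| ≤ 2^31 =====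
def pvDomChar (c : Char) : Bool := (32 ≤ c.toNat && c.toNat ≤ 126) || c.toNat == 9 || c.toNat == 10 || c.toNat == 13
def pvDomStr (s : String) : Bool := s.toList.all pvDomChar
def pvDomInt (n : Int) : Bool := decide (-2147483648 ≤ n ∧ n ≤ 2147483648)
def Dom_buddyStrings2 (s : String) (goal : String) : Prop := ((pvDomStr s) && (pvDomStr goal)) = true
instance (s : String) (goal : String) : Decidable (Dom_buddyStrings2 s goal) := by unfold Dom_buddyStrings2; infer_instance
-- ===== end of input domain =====

-- B replaces A's index-collecting loop and cross-indexed swap check by a zip mismatch count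
-- plus a sorted-characters (anagram) comparison; return values proved equal on all inputs.

-- ===== PORT A =====
def buddyStrings2 (s : String) (goal : String) : Bool :=
  let sl := s.toList
  let gl := goal.toList
  if sl.length ≠ gl.length then false
  else if sl = gl then decide ((PySem.Set.ofList sl).length ≠ sl.length)
  else
    let diff : List Int := (PySem.List.pyRange 0 (sl.length : Int)).foldl
      (fun acc i => if PySem.List.pyGet? sl i != PySem.List.pyGet? gl i then acc ++ [i] else acc) []
    if diff.length ≠ 2 then false
    else
      match diff with
      | [i, j] =>
          decide (PySem.List.pyGet? sl i = PySem.List.pyGet? gl j) &&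
          decide (PySem.List.pyGet? sl j = PySem.List.pyGet? gl i)
      | _ => false

-- ===== PORT B =====
def buddyStrings2_alt (s : String) (goal : String) : Bool :=
  let sl := s.toList
  let gl := goal.toList
  if sl.length ≠ gl.length then false
  else
    let d : Int := (sl.zip gl).foldl (fun acc p => if p.1 != p.2 then acc + 1 else acc) 0
    if d = 0 then decide ((PySem.Set.ofList sl).length < sl.length)
    else decide (d = 2) &&
      decide (PySem.List.sorted sl (fun c => c) = PySem.List.sorted gl (fun c => c))

-- ===== PRECONDITION & SPEC =====
def Spec_buddyStrings2 (s : String) (goal : String) (out : Bool) : Prop := out = buddyStrings2_alt s goal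
instance (s : String) (goal : String) (out : Bool) : Decidable (Spec_buddyStrings2 s goal out) := by unfold Spec_buddyStrings2; infer_instance

-- ===== CLAIM (what is proved, stated in full; the proofs are below) =====
def Claim_equal_buddyStrings2 : Prop := ∀ (s : String) (goal : String), Dom_buddyStrings2 s goal → Spec_buddyStrings2 s goal (buddyStrings2 s goal)

-- ===== LEMMAS AND PROOFS =====

-- the mismatched character pairs, in order (B's view of the data)
def pvMism (l1 l2 : List Char) : List (Char × Char) :=
  (l1.zip l2).filter (fun p => p.1 != p.2)

-- the mismatched indices, in order (A's view of the data)
def pvIdx (l1 l2 : List Char) : List Nat :=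
  (List.range l1.length).filter (fun k => l1[k]? != l2[k]?)

theorem pvIdx_chars (l1 : List Char) : ∀ (l2 : List Char), l1.length = l2.length →
    (pvIdx l1 l2).map (fun k => (l1[k]?, l2[k]?))
      = (pvMism l1 l2).map (fun p => (some p.1, some p.2)) := by
  induction l1 with
  | nil => intro l2 h; cases l2 <;> simp_all [pvIdx, pvMism]
  | cons a t1 ih =>
    intro l2 h
    cases l2 with
    | nil => simp at h
    | cons b t2 =>
      simp only [List.length_cons, Nat.add_right_cancel_iff] at h
      have ih' := ih t2 h
      simp only [pvIdx, pvMism, List.length_cons, List.range_succ_eq_map, List.filter_cons,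
        List.zip_cons_cons, List.filter_map, Function.comp_def, List.getElem?_cons_succ,
        List.getElem?_cons_zero, h] at *
      by_cases hab : a = b
      · subst hab
        simpa using ih'
      · simp_all [Function.comp_def]

theorem pvMism_nil_iff (l1 : List Char) : ∀ (l2 : List Char), l1.length = l2.length →
    (pvMism l1 l2 = [] ↔ l1 = l2) := by
  induction l1 with
  | nil => intro l2 h; cases l2 <;> simp_all [pvMism]
  | cons a t1 ih =>
    intro l2 h
    cases l2 with
    | nil => simp at h
    | cons b t2 =>
      simp only [List.length_cons, Nat.add_right_cancel_iff] at h
      by_cases hab : a = b <;> simp_all [pvMism]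

theorem pvMism_decomp (l1 : List Char) : ∀ (l2 : List Char), l1.length = l2.length →
    ∃ E : Multiset Char,
      (l1 : Multiset Char) = E + ((pvMism l1 l2).map Prod.fst : List Char) ∧
      (l2 : Multiset Char) = E + ((pvMism l1 l2).map Prod.snd : List Char) := by
  induction l1 with
  | nil => intro l2 h; cases l2 <;> simp_all [pvMism]
  | cons a t1 ih =>
    intro l2 h
    cases l2 with
    | nil => simp at h
    | cons b t2 =>
      simp only [List.length_cons, Nat.add_right_cancel_iff] at h
      obtain ⟨E, h1, h2⟩ := ih t2 h
      by_cases hab : a = b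
      · subst hab
        refine ⟨a ::ₘ E, ?_, ?_⟩
        · simp only [pvMism, List.zip_cons_cons, List.filter_cons, bne_self_eq_false,
            Bool.false_eq_true, if_false]
          rw [← Multiset.cons_coe, h1, Multiset.cons_add]; rfl
        · simp only [pvMism, List.zip_cons_cons, List.filter_cons, bne_self_eq_false,
            Bool.false_eq_true, if_false]
          rw [← Multiset.cons_coe, h2, Multiset.cons_add]; rfl
      · refine ⟨E, ?_, ?_⟩
        · simp only [pvMism, List.zip_cons_cons, List.filter_cons, bne_iff_ne, ne_eq, hab,
            not_false_eq_true, if_true, List.map_cons]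
          rw [← Multiset.cons_coe, ← Multiset.cons_coe, Multiset.add_cons, h1]; rfl
        · simp only [pvMism, List.zip_cons_cons, List.filter_cons, bne_iff_ne, ne_eq, hab,
            not_false_eq_true, if_true, List.map_cons]
          rw [← Multiset.cons_coe, ← Multiset.cons_coe, Multiset.add_cons, h2]; rfl

theorem pvPerm_iff (l1 l2 : List Char) (h : l1.length = l2.length) :
    l1.Perm l2 ↔ ((pvMism l1 l2).map Prod.fst).Perm ((pvMism l1 l2).map Prod.snd) := by
  obtain ⟨E, h1, h2⟩ := pvMism_decomp l1 l2 h
  rw [← Multiset.coe_eq_coe, ← Multiset.coe_eq_coe, h1, h2]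
  exact add_right_inj E

theorem pvPerm_pair {a b c d : Char} (hab : a ≠ b) :
    ([a, c].Perm [b, d]) ↔ (a = d ∧ c = b) := by
  constructor
  · intro hp
    have ha : a ∈ [b, d] := hp.mem_iff.mp (by simp)
    have hb : b ∈ [a, c] := hp.mem_iff.mpr (by simp)
    simp only [List.mem_cons, List.not_mem_nil, or_false] at ha hb
    rcases ha with h | h
    · exact absurd h hab
    · rcases hb with h' | h'
      · exact absurd h'.symm hab
      · exact ⟨h, h'.symm⟩
  · rintro ⟨rfl, rfl⟩
    exact List.Perm.swap' _ _ (List.Perm.refl _)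

-- ===== VERDICT (by name: the statement is the Claim_ definition above) =====
theorem buddyStrings2_spec : Claim_equal_buddyStrings2 := by
  intro s goal _
  unfold Spec_buddyStrings2 buddyStrings2 buddyStrings2_alt
  simp only [ne_eq, ite_not]
  by_cases hlen : s.toList.length = goal.toList.length
  case neg => rw [if_neg hlen, if_neg hlen]
  rw [if_pos hlen, if_pos hlen]
  have hdiff : (PySem.List.pyRange 0 (s.toList.length : Int)).foldl
      (fun acc i => if PySem.List.pyGet? s.toList i != PySem.List.pyGet? goal.toList i
        then acc ++ [i] else acc) ([] : List Int)
      = List.map (fun k : Nat => (k : Int)) (pvIdx s.toList goal.toList) := by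
    rw [PySem.List.pyRange_zero_natCast,
        PySem.List.foldl_append_if (f := fun i => i), List.filter_map]
    simp only [List.nil_append, List.map_id', Function.comp_def,
      PySem.List.pyGet?_natCast, pvIdx]
  have hd : (s.toList.zip goal.toList).foldl
      (fun acc p => if p.1 != p.2 then acc + 1 else acc) (0 : Int)
      = ((pvMism s.toList goal.toList).length : Int) := by
    rw [PySem.List.foldl_if_add_one]
    simp [pvMism, List.countP_eq_length_filter]
  have hlenIdx : (pvIdx s.toList goal.toList).length = (pvMism s.toList goal.toList).length := by
    have := congrArg List.length (pvIdx_chars s.toList goal.toList hlen)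
    simpa using this
  rw [hdiff, hd]
  by_cases heq : s.toList = goal.toList
  · rw [if_pos heq]
    have hm : pvMism s.toList goal.toList = [] := (pvMism_nil_iff _ _ hlen).mpr heq
    rw [hm]
    norm_num
    have hle := PySem.Set.length_ofList_le s.toList
    simp only [String.length_toList] at hle
    have h' : (List.length (PySem.Set.ofList s.toList) = s.length)
        ↔ ¬ List.length (PySem.Set.ofList s.toList) < s.length := by omega
    rw [decide_eq_decide.mpr h', decide_not]
  · rw [if_neg heq]
    have hm : pvMism s.toList goal.toList ≠ [] := fun h => heq ((pvMism_nil_iff _ _ hlen).mp h)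
    have hmpos : (pvMism s.toList goal.toList).length ≠ 0 := by
      simpa [List.length_eq_zero_iff] using hm
    have hB0 : ¬ ((pvMism s.toList goal.toList).length : Int) = 0 := by exact_mod_cast hmpos
    rw [if_neg hB0]
    by_cases h2 : (pvMism s.toList goal.toList).length = 2
    · obtain ⟨p, q, hpq⟩ := List.length_eq_two.mp h2
      have hidx2 : (pvIdx s.toList goal.toList).length = 2 := by rw [hlenIdx, h2]
      obtain ⟨i, j, hij⟩ := List.length_eq_two.mp hidx2
      have hchars := pvIdx_chars s.toList goal.toList hlen
      rw [hij, hpq] at hchars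
      simp only [List.map_cons, List.map_nil, List.cons.injEq, Prod.mk.injEq, and_true] at hchars
      obtain ⟨⟨hi1, hi2⟩, hj1, hj2⟩ := hchars
      have hpne : p.1 ≠ p.2 := by
        have hmem : p ∈ pvMism s.toList goal.toList := by rw [hpq]; simp
        simpa [pvMism] using List.of_mem_filter hmem
      have hperm : s.toList.Perm goal.toList ↔ ([p.1, q.1].Perm [p.2, q.2]) := by
        have h' := pvPerm_iff s.toList goal.toList hlen
        rw [hpq] at h'; simpa using h'
      have hiff : ((PySem.List.sorted s.toList (fun c => c))
            = (PySem.List.sorted goal.toList (fun c => c))) ↔ (p.1 = q.2 ∧ q.1 = p.2) := by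
        rw [PySem.List.sorted_id_eq_sorted_id_iff_perm, hperm, pvPerm_pair hpne]
      have hsorted : decide ((PySem.List.sorted s.toList (fun c => c))
            = (PySem.List.sorted goal.toList (fun c => c)))
          = (decide (p.1 = q.2) && decide (q.1 = p.2)) := by
        by_cases hx : p.1 = q.2 <;> by_cases hy : q.1 = p.2 <;> simp [hiff, hx, hy]
      rw [hij, h2]
      rw [if_pos (by simp)]
      simp only [List.map_cons, List.map_nil, Nat.cast_ofNat, PySem.List.pyGet?_natCast,
        hsorted]
      rw [hi1, hi2, hj1, hj2]
      simp
    · have hA : ¬ (List.map (fun k : Nat => (k : Int)) (pvIdx s.toList goal.toList)).length = 2 := by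
        simpa [hlenIdx] using h2
      rw [if_neg hA]
      have hB2 : decide (((pvMism s.toList goal.toList).length : Int) = 2) = false := by
        simp only [decide_eq_false_iff_not]
        exact_mod_cast h2
      simp [hB2]
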